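-- pv_equiv track=rewrite | github.com/alexmsalex/VHALINOR---IA | raciocinio_avancado.py | _extrair_padroes
-- ===== SOURCE A (Python) =====
-- from typing import Dict, List, Any, Optional, Tuple, Union
--
-- def _extrair_padroes(observacoes: List[Dict]) -> Dict[str, Any]:
--     """Extrair padrões de observações"""
--     # Simplificação: contar frequências
--     frequencias = {}
--     for obs in observacoes:
--         for chave, valor in obs.items():
--             if chave not in frequencias:
--                 frequencias[chave] = {}
--             if valor not in frequencias[chave]:
--                 frequencias[chave][valor] = 0
--             frequencias[chave][valor] += 1
--
--     return frequencias
-- ===== SOURCE B (Python) =====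
-- def _extrair_padroes(observacoes):
--     """Extrair padroes de observacoes: flat tuple-keyed count, then reshape."""
--     contagem = {}
--     for obs in observacoes:
--         for chave, valor in obs.items():
--             contagem[(chave, valor)] = contagem.get((chave, valor), 0) + 1
--     frequencias = {}
--     for (chave, valor), n in contagem.items():
--         if chave not in frequencias:
--             frequencias[chave] = {}
--         frequencias[chave][valor] = n
--     return frequencias
-- ===== Notes on version B (the rewrite author's own statement) =====
-- stated objective: alternative
-- what changed: Replaced the incremental nested-dict updates by one pass counting into a flat dict keyed by (chave, valor) tuples followed by a separate reshape pass that builds the nested result from the counter's items.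
import Mathlib
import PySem

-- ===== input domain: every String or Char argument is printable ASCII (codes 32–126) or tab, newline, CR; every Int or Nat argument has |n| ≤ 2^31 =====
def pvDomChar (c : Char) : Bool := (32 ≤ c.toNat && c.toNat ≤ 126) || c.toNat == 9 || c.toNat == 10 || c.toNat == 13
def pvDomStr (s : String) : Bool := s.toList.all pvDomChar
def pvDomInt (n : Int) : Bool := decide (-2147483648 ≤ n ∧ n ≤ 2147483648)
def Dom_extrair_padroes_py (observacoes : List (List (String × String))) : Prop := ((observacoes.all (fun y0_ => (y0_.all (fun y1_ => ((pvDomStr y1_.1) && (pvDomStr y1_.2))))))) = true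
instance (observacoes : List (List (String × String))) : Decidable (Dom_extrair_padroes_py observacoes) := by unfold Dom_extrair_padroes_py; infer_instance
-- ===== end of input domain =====

-- B replaces A's incremental nested-dict updates by a flat (chave, valor)-keyed counting pass plus a
-- separate reshape pass over the counter's items (objective: alternative decomposition, same cost).

-- ===== PORT A =====
def extrair_padroes_py (observacoes : List (List (String × String))) : List (String × List (String × Int)) :=
  let frequencias : PySem.Dict String (PySem.Dict String Int) :=
    observacoes.foldl (fun frequencias obs =>
      obs.foldl (fun frequencias p =>
        let frequencias :=
          if frequencias.contains p.1 then frequencias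
          else frequencias.insert p.1 PySem.Dict.empty
        let inner := frequencias.getD p.1 PySem.Dict.empty
        let inner := if inner.contains p.2 then inner else inner.insert p.2 0
        let inner := inner.insert p.2 (inner.getD p.2 0 + 1)
        frequencias.insert p.1 inner) frequencias) PySem.Dict.empty
  frequencias.items.map (fun q => (q.1, q.2.items))

-- ===== PORT B =====
def extrair_padroes_py_alt (observacoes : List (List (String × String))) : List (String × List (String × Int)) :=
  let contagem : PySem.Dict (String × String) Int :=
    observacoes.foldl (fun contagem obs =>
      obs.foldl (fun contagem p => contagem.insert p (contagem.getD p 0 + 1)) contagem) PySem.Dict.empty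
  let frequencias : PySem.Dict String (PySem.Dict String Int) :=
    contagem.items.foldl (fun frequencias q =>
      let frequencias :=
        if frequencias.contains q.1.1 then frequencias
        else frequencias.insert q.1.1 PySem.Dict.empty
      frequencias.insert q.1.1 ((frequencias.getD q.1.1 PySem.Dict.empty).insert q.1.2 q.2))
      PySem.Dict.empty
  frequencias.items.map (fun q => (q.1, q.2.items))

-- ===== PRECONDITION & SPEC =====
def Spec_extrair_padroes_py (observacoes : List (List (String × String))) (out : List (String × List (String × Int))) : Prop := out = extrair_padroes_py_alt observacoes
instance (observacoes : List (List (String × String))) (out : List (String × List (String × Int))) : Decidable (Spec_extrair_padroes_py observacoes out) := by unfold Spec_extrair_padroes_py; infer_instance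

-- ===== CLAIM (what is proved, stated in full; the proofs are below) =====
def Claim_equal_extrair_padroes_py : Prop := ∀ (observacoes : List (List (String × String))), Dom_extrair_padroes_py observacoes → Spec_extrair_padroes_py observacoes (extrair_padroes_py observacoes)

-- ===== LEMMAS AND PROOFS =====

theorem dict_not_contains_iff {κ ν : Type} [BEq κ] (d : PySem.Dict κ ν) (k : κ) :
    d.contains k = false ↔ ∀ p ∈ d.items, (p.1 == k) = false := by
  simp [PySem.Dict.contains, List.any_eq_false]

theorem dict_insert_insert_self {κ ν : Type} [BEq κ] [LawfulBEq κ] (d : PySem.Dict κ ν) (k : κ) (v w : ν) :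
    (d.insert k v).insert k w = d.insert k w := by
  apply PySem.Dict.ext
  by_cases h : d.contains k
  · rw [PySem.Dict.items_insert_of_contains _ w (PySem.Dict.contains_insert_self d k v),
        PySem.Dict.items_insert_of_contains _ v h, PySem.Dict.items_insert_of_contains _ w h,
        List.map_map]
    apply List.map_congr_left
    intro p _
    by_cases hp : p.1 == k <;> simp [hp]
  · have hf : d.contains k = false := by simpa using h
    have h2 := (dict_not_contains_iff d k).mp hf
    rw [PySem.Dict.items_insert_of_contains _ w (PySem.Dict.contains_insert_self d k v),
        PySem.Dict.items_insert_of_not_contains _ v hf,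
        PySem.Dict.items_insert_of_not_contains _ w hf,
        List.map_append]
    congr 1
    · conv_rhs => rw [← List.map_id d.items]
      apply List.map_congr_left; intro p hp; simp [h2 p hp]
    · simp

theorem stepB_eq (f : PySem.Dict String (PySem.Dict String Int)) (q : (String × String) × Int) :
    (let f' := if f.contains q.1.1 then f else f.insert q.1.1 PySem.Dict.empty
     f'.insert q.1.1 ((f'.getD q.1.1 PySem.Dict.empty).insert q.1.2 q.2))
    = f.modify q.1.1 PySem.Dict.empty (fun inn => inn.insert q.1.2 q.2) := by
  by_cases h : f.contains q.1.1
  · simp only [h, if_true, PySem.Dict.modify]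
  · have hf : f.contains q.1.1 = false := by simpa using h
    simp only [hf, Bool.false_eq_true, if_false, PySem.Dict.modify,
      PySem.Dict.getD_insert_self, PySem.Dict.getD_of_not_contains _ _ hf,
      dict_insert_insert_self]

theorem stepA_eq (d : PySem.Dict String (PySem.Dict String Int)) (p : String × String) :
    (let d' := if d.contains p.1 then d else d.insert p.1 PySem.Dict.empty
     let inner := d'.getD p.1 PySem.Dict.empty
     let inner := if inner.contains p.2 then inner else inner.insert p.2 0
     let inner := inner.insert p.2 (inner.getD p.2 0 + 1)
     d'.insert p.1 inner)
    = d.modify p.1 PySem.Dict.empty (fun inn => inn.modify p.2 0 (· + 1)) := by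
  have hinner : ∀ inn : PySem.Dict String Int,
      (let inner := if inn.contains p.2 then inn else inn.insert p.2 0
       inner.insert p.2 (inner.getD p.2 0 + 1)) = inn.modify p.2 0 (· + 1) := by
    intro inn
    by_cases h : inn.contains p.2
    · simp only [h, if_true, PySem.Dict.modify, PySem.Dict.getD]
    · have hf : inn.contains p.2 = false := by simpa using h
      simp only [hf, Bool.false_eq_true, if_false, PySem.Dict.modify,
        PySem.Dict.getD_insert_self, PySem.Dict.getD_of_not_contains _ _ hf,
        dict_insert_insert_self]
  by_cases h : d.contains p.1
  · simp only [h, if_true, PySem.Dict.modify, hinner]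
  · have hf : d.contains p.1 = false := by simpa using h
    simp only [hf, Bool.false_eq_true, if_false, PySem.Dict.modify,
      PySem.Dict.getD_insert_self, PySem.Dict.getD_of_not_contains _ _ hf,
      dict_insert_insert_self, hinner]

theorem set_ofList_append_singleton {α : Type} [BEq α] (l : List α) (x : α) :
    PySem.Set.ofList (l ++ [x]) = PySem.Set.add (PySem.Set.ofList l) x := by
  simp [PySem.Set.ofList_eq_foldl, List.foldl_append]


theorem set_ofList_map_ofList {α β : Type} [BEq α] [LawfulBEq α] [BEq β] [LawfulBEq β]
    (f : α → β) (l : List α) :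
    PySem.Set.ofList ((PySem.Set.ofList l).map f) = PySem.Set.ofList (l.map f) := by
  induction l using List.reverseRecOn with
  | nil => rfl
  | append_singleton s x ih =>
    rw [set_ofList_append_singleton, List.map_append, List.map_singleton,
      set_ofList_append_singleton]
    by_cases h : x ∈ PySem.Set.ofList s
    · have hs : x ∈ s := (PySem.Set.mem_ofList s x).mp h
      have hfm : f x ∈ PySem.Set.ofList (List.map f s) := by
        rw [PySem.Set.mem_ofList]; exact List.mem_map_of_mem hs
      simp [PySem.Set.add, PySem.Set.contains, hs, hfm, ih]
    · have hs : x ∉ s := fun hx => h ((PySem.Set.mem_ofList s x).mpr hx)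
      have hadd : (PySem.Set.ofList s).add x = PySem.Set.ofList s ++ [x] := by
        simp [PySem.Set.add, PySem.Set.contains, hs]
      rw [hadd, List.map_append, List.map_singleton, set_ofList_append_singleton, ih]

theorem mem_snd_filter (s : List (String × String)) (k v : String) :
    v ∈ (s.filter (fun p => p.1 == k)).map (·.2) ↔ (k, v) ∈ s := by
  constructor
  · rintro hm
    rcases List.mem_map.mp hm with ⟨⟨a, b⟩, hab, hb⟩
    rcases List.mem_filter.mp hab with ⟨hmem, hk⟩
    simp only at hb hk
    have : a = k := by simpa using hk
    subst this; subst hb; exact hmem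
  · intro hm
    exact List.mem_map.mpr ⟨(k, v), List.mem_filter.mpr ⟨hm, by simp⟩, rfl⟩

theorem set_filter_fst (l : List (String × String)) (k : String) :
    (PySem.Set.ofList l).filter (fun p => p.1 == k)
      = (PySem.Set.ofList ((l.filter (fun p => p.1 == k)).map (·.2))).map (fun v => (k, v)) := by
  induction l using List.reverseRecOn with
  | nil => rfl
  | append_singleton s p ih =>
    rw [set_ofList_append_singleton]
    by_cases hp : p.1 == k
    · have hpk : p.1 = k := by simpa using hp
      have h1 : List.filter (fun q => q.1 == k) [p] = [p] := by simp [hp]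
      have hpe : (k, p.2) = p := by rw [← hpk]
      by_cases h : p ∈ PySem.Set.ofList s
      · have hs : p ∈ s := (PySem.Set.mem_ofList s p).mp h
        have hv : p.2 ∈ (s.filter (fun q => q.1 == k)).map (·.2) :=
          (mem_snd_filter s k p.2).mpr (by rw [hpe]; exact hs)
        have hadd : (PySem.Set.ofList s).add p = PySem.Set.ofList s := by
          simp [PySem.Set.add, PySem.Set.contains, hs]
        have hadd2 : (PySem.Set.ofList ((s.filter (fun q => q.1 == k)).map (·.2))).add p.2
            = PySem.Set.ofList ((s.filter (fun q => q.1 == k)).map (·.2)) := by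
          simp [PySem.Set.add, PySem.Set.contains, hv]
        rw [hadd, ih, List.filter_append, h1, List.map_append, List.map_singleton,
          set_ofList_append_singleton, hadd2]
      · have hs : p ∉ s := fun hx => h ((PySem.Set.mem_ofList s p).mpr hx)
        have hv : p.2 ∉ (s.filter (fun q => q.1 == k)).map (·.2) := by
          rw [mem_snd_filter, hpe]; exact hs
        have hadd : (PySem.Set.ofList s).add p = PySem.Set.ofList s ++ [p] := by
          simp [PySem.Set.add, PySem.Set.contains, hs]
        have hadd2 : (PySem.Set.ofList ((s.filter (fun q => q.1 == k)).map (·.2))).add p.2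
            = PySem.Set.ofList ((s.filter (fun q => q.1 == k)).map (·.2)) ++ [p.2] := by
          simp [PySem.Set.add, PySem.Set.contains, hv]
        rw [hadd, List.filter_append, ih, h1, List.filter_append, h1, List.map_append,
          List.map_singleton, set_ofList_append_singleton, hadd2, List.map_append,
          List.map_singleton, hpe]
    · have hpf : (p.1 == k) = false := by simpa using hp
      have h1 : List.filter (fun q => q.1 == k) [p] = [] := by simp [hpf]
      by_cases h : p ∈ PySem.Set.ofList s
      · have hs : p ∈ s := (PySem.Set.mem_ofList s p).mp h
        have hadd : (PySem.Set.ofList s).add p = PySem.Set.ofList s := by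
          simp [PySem.Set.add, PySem.Set.contains, hs]
        rw [hadd, ih, List.filter_append, h1, List.append_nil]
      · have hs : p ∉ s := fun hx => h ((PySem.Set.mem_ofList s p).mpr hx)
        have hadd : (PySem.Set.ofList s).add p = PySem.Set.ofList s ++ [p] := by
          simp [PySem.Set.add, PySem.Set.contains, hs]
        rw [hadd, List.filter_append, ih, h1, List.filter_append, h1, List.append_nil,
          List.append_nil]

def canonInner (l : List (String × String)) (k : String) : List (String × Int) :=
  (PySem.Set.ofList ((l.filter (fun p => p.1 == k)).map (·.2))).map (fun v => (v, (l.count (k, v) : Int)))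

def canonD (l : List (String × String)) : List (String × PySem.Dict String Int) :=
  (PySem.Set.ofList (l.map (·.1))).map (fun k => (k, PySem.Dict.mk (canonInner l k)))

theorem count_append_singleton_ne (l : List (String × String)) (p q : String × String)
    (h : q ≠ p) : (l ++ [p]).count q = l.count q := by
  simp [List.count_append, Ne.symm h]

theorem canonInner_append_ne (l : List (String × String)) (p : String × String) (k' : String)
    (h : k' ≠ p.1) : canonInner (l ++ [p]) k' = canonInner l k' := by
  unfold canonInner
  have hf : List.filter (fun q => q.1 == k') [p] = [] := by
    simp [show (p.1 == k') = false by simpa using (Ne.symm h)]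
  rw [List.filter_append, hf, List.append_nil]
  apply List.map_congr_left
  intro v _
  have : (k', v) ≠ p := by intro hc; exact h (by rw [← hc])
  rw [count_append_singleton_ne l p (k', v) this]

theorem canonInner_append_new (l : List (String × String)) (p : String × String)
    (h : p.1 ∉ l.map (·.1)) : canonInner (l ++ [p]) p.1 = [(p.2, 1)] := by
  unfold canonInner
  have hf0 : List.filter (fun q => q.1 == p.1) l = [] := by
    rw [List.filter_eq_nil_iff]
    intro q hq
    simp only [beq_iff_eq]
    intro hc; exact h (hc ▸ List.mem_map_of_mem hq)
  have hc0 : l.count (p.1, p.2) = 0 := by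
    rw [List.count_eq_zero]
    intro hc; exact h (List.mem_map.mpr ⟨(p.1, p.2), hc, rfl⟩)
  rw [List.filter_append, hf0]
  simp [List.count_append, hc0, PySem.Set.ofList_eq_foldl, PySem.Set.add, PySem.Set.contains]

theorem canonInner_append_mem (l : List (String × String)) (p : String × String)
    (hv : p.2 ∈ (l.filter (fun q => q.1 == p.1)).map (·.2)) :
    canonInner (l ++ [p]) p.1
      = (canonInner l p.1).map
          (fun q => if q.1 == p.2 then (p.2, (l.count (p.1, p.2) : Int) + 1) else q) := by
  unfold canonInner
  have hf : List.filter (fun q => q.1 == p.1) [p] = [p] := by simp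
  rw [List.filter_append, hf, List.map_append, List.map_singleton,
    set_ofList_append_singleton]
  have hadd : (PySem.Set.ofList ((l.filter (fun q => q.1 == p.1)).map (·.2))).add p.2
      = PySem.Set.ofList ((l.filter (fun q => q.1 == p.1)).map (·.2)) := by
    simp [PySem.Set.add, PySem.Set.contains, hv]
  rw [hadd, List.map_map]
  apply List.map_congr_left
  intro v hvm
  by_cases hvp : v = p.2
  · subst hvp
    simp [List.count_append]
  · have h1 : ((l ++ [p]).count (p.1, v) : Int) = (l.count (p.1, v) : Int) := by
      rw [count_append_singleton_ne l p (p.1, v) (by simp [Prod.ext_iff]; exact hvp)]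
    simp only [Function.comp_apply, h1, show (v == p.2) = false by simpa using hvp,
      Bool.false_eq_true, if_false]

theorem canonInner_append_notmem (l : List (String × String)) (p : String × String)
    (hv : p.2 ∉ (l.filter (fun q => q.1 == p.1)).map (·.2)) :
    canonInner (l ++ [p]) p.1 = canonInner l p.1 ++ [(p.2, 1)] := by
  unfold canonInner
  have hf : List.filter (fun q => q.1 == p.1) [p] = [p] := by simp
  rw [List.filter_append, hf, List.map_append, List.map_singleton,
    set_ofList_append_singleton]
  have hadd : (PySem.Set.ofList ((l.filter (fun q => q.1 == p.1)).map (·.2))).add p.2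
      = PySem.Set.ofList ((l.filter (fun q => q.1 == p.1)).map (·.2)) ++ [p.2] := by
    have : p.2 ∉ PySem.Set.ofList ((l.filter (fun q => q.1 == p.1)).map (·.2)) := by
      rw [PySem.Set.mem_ofList]; exact hv
    simp [PySem.Set.add, PySem.Set.contains, this]
  have hc0 : l.count (p.1, p.2) = 0 := by
    rw [List.count_eq_zero]
    intro hc
    exact hv ((mem_snd_filter l p.1 p.2).mpr hc)
  rw [hadd, List.map_append, List.map_singleton]
  congr 1
  · apply List.map_congr_left
    intro v hvm
    have hvp : v ≠ p.2 := by
      intro hc; subst hc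
      exact hv ((PySem.Set.mem_ofList _ _).mp hvm)
    rw [count_append_singleton_ne l p (p.1, v) (by simp [Prod.ext_iff]; exact hvp)]
  · simp [List.count_append, hc0]

theorem canonInner_keys (l : List (String × String)) (k : String) :
    (canonInner l k).map (·.1) = PySem.Set.ofList ((l.filter (fun p => p.1 == k)).map (·.2)) := by
  simp [canonInner, List.map_map, Function.comp_def]

theorem canonD_keys (l : List (String × String)) :
    (canonD l).map (·.1) = PySem.Set.ofList (l.map (·.1)) := by
  simp [canonD, List.map_map, Function.comp_def]

theorem foldA_items (l : List (String × String)) :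
    (l.foldl (fun d p => d.modify p.1 PySem.Dict.empty (fun inn => inn.modify p.2 0 (· + 1)))
        (PySem.Dict.empty : PySem.Dict String (PySem.Dict String Int))).items = canonD l := by
  induction l using List.reverseRecOn with
  | nil => rfl
  | append_singleton l p ih =>
    rw [List.foldl_append, List.foldl_cons, List.foldl_nil]
    generalize hD : l.foldl
        (fun d p => d.modify p.1 PySem.Dict.empty (fun inn => inn.modify p.2 0 (· + 1)))
        (PySem.Dict.empty : PySem.Dict String (PySem.Dict String Int)) = D at ih ⊢
    have hkeys : D.keys = PySem.Set.ofList (l.map (·.1)) := by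
      show D.items.map (·.1) = _
      rw [ih, canonD_keys]
    have hnod : D.keys.Nodup := by rw [hkeys]; exact PySem.Set.nodup_ofList _
    unfold canonD
    rw [List.map_append, List.map_singleton, set_ofList_append_singleton]
    by_cases hk : p.1 ∈ l.map (·.1)
    · have hct : D.contains p.1 = true := by
        rw [PySem.Dict.contains_eq_decide_mem_keys, hkeys]
        simpa [PySem.Set.mem_ofList] using hk
      have hmem : (p.1, PySem.Dict.mk (canonInner l p.1)) ∈ D.items := by
        rw [ih]
        exact List.mem_map.mpr ⟨p.1, (PySem.Set.mem_ofList _ _).mpr hk, rfl⟩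
      have hgetD : D.getD p.1 PySem.Dict.empty = PySem.Dict.mk (canonInner l p.1) :=
        PySem.Dict.getD_of_mem_items D hmem hnod _
      have hIkeys : (PySem.Dict.mk (canonInner l p.1) : PySem.Dict String Int).keys
          = PySem.Set.ofList ((l.filter (fun q => q.1 == p.1)).map (·.2)) := by
        show (canonInner l p.1).map (·.1) = _
        rw [canonInner_keys]
      have hInod : (PySem.Dict.mk (canonInner l p.1) : PySem.Dict String Int).keys.Nodup := by
        rw [hIkeys]; exact PySem.Set.nodup_ofList _
      have hNewItems : ((PySem.Dict.mk (canonInner l p.1) : PySem.Dict String Int).modify p.2 0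
          (· + 1)).items = canonInner (l ++ [p]) p.1 := by
        by_cases hv : p.2 ∈ (l.filter (fun q => q.1 == p.1)).map (·.2)
        · have hIct : (PySem.Dict.mk (canonInner l p.1) : PySem.Dict String Int).contains p.2
              = true := by
            rw [PySem.Dict.contains_eq_decide_mem_keys, hIkeys]
            simpa [PySem.Set.mem_ofList] using hv
          have hImem : (p.2, (l.count (p.1, p.2) : Int))
              ∈ (PySem.Dict.mk (canonInner l p.1) : PySem.Dict String Int).items :=
            List.mem_map.mpr ⟨p.2, (PySem.Set.mem_ofList _ _).mpr hv, rfl⟩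
          have hIgetD : (PySem.Dict.mk (canonInner l p.1) : PySem.Dict String Int).getD p.2 0
              = (l.count (p.1, p.2) : Int) :=
            PySem.Dict.getD_of_mem_items _ hImem hInod _
          rw [PySem.Dict.modify, hIgetD, PySem.Dict.items_insert_of_contains _ _ hIct,
            canonInner_append_mem l p hv]
        · have hIcf : (PySem.Dict.mk (canonInner l p.1) : PySem.Dict String Int).contains p.2
              = false := by
            rw [PySem.Dict.contains_eq_decide_mem_keys, hIkeys]
            simpa [PySem.Set.mem_ofList] using hv
          have hIgetD : (PySem.Dict.mk (canonInner l p.1) : PySem.Dict String Int).getD p.2 0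
              = 0 := PySem.Dict.getD_of_not_contains _ _ hIcf
          rw [PySem.Dict.modify, hIgetD, PySem.Dict.items_insert_of_not_contains _ _ hIcf,
            canonInner_append_notmem l p hv]
          norm_num
      have hadd : (PySem.Set.ofList (l.map (·.1))).add p.1 = PySem.Set.ofList (l.map (·.1)) := by
        simp [PySem.Set.add, PySem.Set.contains, (PySem.Set.mem_ofList _ _).mpr hk]
      rw [PySem.Dict.modify, hgetD, PySem.Dict.items_insert_of_contains _ _ hct, ih, hadd,
        canonD, List.map_map]
      apply List.map_congr_left
      intro k' hk'
      have hk'l : k' ∈ l.map (·.1) := (PySem.Set.mem_ofList _ _).mp hk'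
      by_cases hkp : k' = p.1
      · subst hkp
        simp only [Function.comp_apply, beq_self_eq_true, if_true]
        congr 1
        apply PySem.Dict.ext
        rw [hNewItems]
      · simp only [Function.comp_apply, show (k' == p.1) = false by simpa using hkp,
          Bool.false_eq_true, if_false, canonInner_append_ne l p k' hkp]
    · have hcf : D.contains p.1 = false := by
        rw [PySem.Dict.contains_eq_decide_mem_keys, hkeys]
        simpa [PySem.Set.mem_ofList] using hk
      have hgetD : D.getD p.1 PySem.Dict.empty = PySem.Dict.empty :=
        PySem.Dict.getD_of_not_contains _ _ hcf
      have hnew : ((PySem.Dict.empty : PySem.Dict String Int).modify p.2 0 (· + 1))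
          = PySem.Dict.mk [(p.2, 1)] := by
        apply PySem.Dict.ext
        simp [PySem.Dict.modify, PySem.Dict.insert, PySem.Dict.contains, PySem.Dict.empty,
          PySem.Dict.getD, PySem.Dict.get?, zero_add]
      have hadd : (PySem.Set.ofList (l.map (·.1))).add p.1
          = PySem.Set.ofList (l.map (·.1)) ++ [p.1] := by
        have : p.1 ∉ PySem.Set.ofList (l.map (·.1)) := by
          rw [PySem.Set.mem_ofList]; exact hk
        simp [PySem.Set.add, PySem.Set.contains, this]
      rw [PySem.Dict.modify, hgetD, hnew, PySem.Dict.items_insert_of_not_contains _ _ hcf, ih,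
        hadd, List.map_append, List.map_singleton, canonInner_append_new l p hk]
      congr 1
      unfold canonD
      apply List.map_congr_left
      intro k' hk'
      have hk'l : k' ∈ l.map (·.1) := (PySem.Set.mem_ofList _ _).mp hk'
      have : k' ≠ p.1 := by intro hc; subst hc; exact hk hk'l
      rw [canonInner_append_ne l p k' this]

theorem foldB_items (its : List ((String × String) × Int)) (h : (its.map (·.1)).Nodup) :
    (its.foldl (fun f q => f.modify q.1.1 PySem.Dict.empty (fun inn => inn.insert q.1.2 q.2))
        (PySem.Dict.empty : PySem.Dict String (PySem.Dict String Int))).items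
      = (PySem.Set.ofList (its.map (·.1.1))).map
          (fun k => (k, PySem.Dict.mk ((its.filter (fun q => q.1.1 == k)).map (fun q => (q.1.2, q.2))))) := by
  induction its using List.reverseRecOn with
  | nil => rfl
  | append_singleton its q ih =>
    rw [List.map_append, List.map_singleton] at h
    have hnods := (List.nodup_append.mp h).1
    have hq1 : q.1 ∉ its.map (·.1) := by
      have h' := h
      simp only [List.nodup_append] at h'
      intro hc
      exact h'.2.2 q.1 hc q.1 (List.mem_singleton_self _) rfl
    have ih := ih hnods
    rw [List.foldl_append, List.foldl_cons, List.foldl_nil]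
    generalize hF : its.foldl
        (fun f q => f.modify q.1.1 PySem.Dict.empty (fun inn => inn.insert q.1.2 q.2))
        (PySem.Dict.empty : PySem.Dict String (PySem.Dict String Int)) = F at ih ⊢
    have hkeys : F.keys = PySem.Set.ofList (its.map (·.1.1)) := by
      show F.items.map (·.1) = _
      rw [ih, List.map_map]
      simp [Function.comp_def]
    have hnod : F.keys.Nodup := by rw [hkeys]; exact PySem.Set.nodup_ofList _
    rw [List.map_append, List.map_singleton, set_ofList_append_singleton]
    by_cases hk : q.1.1 ∈ its.map (·.1.1)
    · have hct : F.contains q.1.1 = true := by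
        rw [PySem.Dict.contains_eq_decide_mem_keys, hkeys]
        simpa [PySem.Set.mem_ofList] using hk
      have hmem : (q.1.1, PySem.Dict.mk ((its.filter (fun r => r.1.1 == q.1.1)).map
          (fun r => (r.1.2, r.2)))) ∈ F.items := by
        rw [ih]
        exact List.mem_map.mpr ⟨q.1.1, (PySem.Set.mem_ofList _ _).mpr hk, rfl⟩
      have hgetD : F.getD q.1.1 PySem.Dict.empty = PySem.Dict.mk
          ((its.filter (fun r => r.1.1 == q.1.1)).map (fun r => (r.1.2, r.2))) :=
        PySem.Dict.getD_of_mem_items F hmem hnod _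
      have hIcf : (PySem.Dict.mk ((its.filter (fun r => r.1.1 == q.1.1)).map
          (fun r => (r.1.2, r.2))) : PySem.Dict String Int).contains q.1.2 = false := by
        rw [PySem.Dict.contains_eq_decide_mem_keys]
        simp only [decide_eq_false_iff_not]
        intro hc
        have : q.1.2 ∈ ((its.filter (fun r => r.1.1 == q.1.1)).map (fun r => (r.1.2, r.2))).map (·.1) := hc
        rw [List.map_map] at this
        rcases List.mem_map.mp this with ⟨r, hr, hr2⟩
        rcases List.mem_filter.mp hr with ⟨hrm, hr1⟩
        apply hq1
        have hr1' : r.1.1 = q.1.1 := by simpa using hr1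
        have : r.1 = q.1 := Prod.ext hr1' hr2
        exact this ▸ List.mem_map_of_mem hrm
      have hNewItems : ((PySem.Dict.mk ((its.filter (fun r => r.1.1 == q.1.1)).map
          (fun r => (r.1.2, r.2))) : PySem.Dict String Int).insert q.1.2 q.2).items
          = ((its ++ [q]).filter (fun r => r.1.1 == q.1.1)).map (fun r => (r.1.2, r.2)) := by
        rw [PySem.Dict.items_insert_of_not_contains _ _ hIcf, List.filter_append]
        simp
      have hadd : (PySem.Set.ofList (its.map (·.1.1))).add q.1.1
          = PySem.Set.ofList (its.map (·.1.1)) := by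
        simp [PySem.Set.add, PySem.Set.contains, (PySem.Set.mem_ofList _ _).mpr hk]
      rw [PySem.Dict.modify, hgetD, PySem.Dict.items_insert_of_contains _ _ hct, ih, hadd,
        List.map_map]
      apply List.map_congr_left
      intro k' hk'
      by_cases hkp : k' = q.1.1
      · subst hkp
        simp only [Function.comp_apply, beq_self_eq_true, if_true]
        congr 1
        apply PySem.Dict.ext
        rw [hNewItems]
      · have hfq : List.filter (fun r => r.1.1 == k') [q] = [] := by
          simp [show (q.1.1 == k') = false by simpa using (Ne.symm hkp)]
        simp only [Function.comp_apply, show (k' == q.1.1) = false by simpa using hkp,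
          Bool.false_eq_true, if_false, List.filter_append, hfq, List.append_nil]
    · have hcf : F.contains q.1.1 = false := by
        rw [PySem.Dict.contains_eq_decide_mem_keys, hkeys]
        simpa [PySem.Set.mem_ofList] using hk
      have hgetD : F.getD q.1.1 PySem.Dict.empty = PySem.Dict.empty :=
        PySem.Dict.getD_of_not_contains _ _ hcf
      have hfilt0 : its.filter (fun r => r.1.1 == q.1.1) = [] := by
        rw [List.filter_eq_nil_iff]
        intro r hr
        simp only [beq_iff_eq]
        intro hc; exact hk (hc ▸ List.mem_map_of_mem hr)
      have hadd : (PySem.Set.ofList (its.map (·.1.1))).add q.1.1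
          = PySem.Set.ofList (its.map (·.1.1)) ++ [q.1.1] := by
        have : q.1.1 ∉ PySem.Set.ofList (its.map (·.1.1)) := by
          rw [PySem.Set.mem_ofList]; exact hk
        simp [PySem.Set.add, PySem.Set.contains, this]
      have hnew : ((PySem.Dict.empty : PySem.Dict String Int).insert q.1.2 q.2)
          = PySem.Dict.mk [(q.1.2, q.2)] := by
        apply PySem.Dict.ext
        simp [PySem.Dict.insert, PySem.Dict.contains, PySem.Dict.empty]
      rw [PySem.Dict.modify, hgetD, hnew, PySem.Dict.items_insert_of_not_contains _ _ hcf, ih,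
        hadd, List.map_append, List.map_singleton]
      congr 1
      · apply List.map_congr_left
        intro k' hk'
        have : k' ≠ q.1.1 := by
          intro hc; subst hc; exact hk ((PySem.Set.mem_ofList _ _).mp hk')
        have hfq : List.filter (fun r => r.1.1 == k') [q] = [] := by
          simp [show (q.1.1 == k') = false by simpa using (Ne.symm this)]
        rw [List.filter_append, hfq, List.append_nil]
      · rw [List.filter_append, hfilt0, List.nil_append]
        simp

theorem reshape_counter_items (l : List (String × String)) :
    ((PySem.Dict.counter l).items.foldl
        (fun f q => f.modify q.1.1 PySem.Dict.empty (fun inn => inn.insert q.1.2 q.2))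
        (PySem.Dict.empty : PySem.Dict String (PySem.Dict String Int))).items = canonD l := by
  rw [PySem.Dict.items_counter]
  rw [foldB_items _ (by simp [List.map_map, Function.comp_def])]
  have houter : ((PySem.Set.ofList l).map (fun k => (k, (List.count k l : Int)))).map (·.1.1)
      = (PySem.Set.ofList l).map (·.1) := by
    rw [List.map_map]; rfl
  rw [houter, set_ofList_map_ofList]
  unfold canonD
  apply List.map_congr_left
  intro k hk
  congr 1
  apply PySem.Dict.ext
  show _ = canonInner l k
  rw [List.filter_map]
  have hc1 : ((fun q => q.1.1 == k) ∘ fun k' : String × String => (k', (List.count k' l : Int)))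
      = fun p : String × String => p.1 == k := rfl
  rw [hc1, List.map_map]
  have hc2 : ((fun q => (q.1.2, q.2)) ∘ fun k' : String × String => (k', (List.count k' l : Int)))
      = fun p : String × String => (p.2, (List.count p l : Int)) := rfl
  rw [hc2, set_filter_fst l k, List.map_map]
  rfl

-- ===== VERDICT (by name: the statement is the Claim_ definition above) =====
theorem extrair_padroes_py_spec : Claim_equal_extrair_padroes_py := by
  intro observacoes _
  show extrair_padroes_py observacoes = extrair_padroes_py_alt observacoes
  have hA : (fun (d : PySem.Dict String (PySem.Dict String Int)) (p : String × String) =>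
        let d' := if d.contains p.1 then d else d.insert p.1 PySem.Dict.empty
        let inner := d'.getD p.1 PySem.Dict.empty
        let inner := if inner.contains p.2 then inner else inner.insert p.2 0
        let inner := inner.insert p.2 (inner.getD p.2 0 + 1)
        d'.insert p.1 inner)
      = fun d p => d.modify p.1 PySem.Dict.empty (fun inn => inn.modify p.2 0 (· + 1)) :=
    funext fun d => funext fun p => stepA_eq d p
  have hB : (fun (f : PySem.Dict String (PySem.Dict String Int)) (q : (String × String) × Int) =>
        let f' := if f.contains q.1.1 then f else f.insert q.1.1 PySem.Dict.empty
        f'.insert q.1.1 ((f'.getD q.1.1 PySem.Dict.empty).insert q.1.2 q.2))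
      = fun f q => f.modify q.1.1 PySem.Dict.empty (fun inn => inn.insert q.1.2 q.2) :=
    funext fun f => funext fun q => stepB_eq f q
  simp only [extrair_padroes_py, extrair_padroes_py_alt]
  rw [hA, hB, ← List.foldl_flatten, ← List.foldl_flatten,
    PySem.Dict.foldl_insert_getD_add_one_eq_counter]
  rw [foldA_items, reshape_counter_items]
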